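-- pv_equiv track=rewrite | github.com/jcolinpatrick/kryptos | scripts/e_roman_04b_abscissa_coords.py | collar_model
-- ===== SOURCE A (Python) =====
-- def collar_model(ct_text, d1, d2, d3, kv1, kv2, kv3, ct_len):
--     """Three independent keyword streams select (z,y,x) coordinates."""
--     total = d1 * d2 * d3
--     padded = ct_text + 'X' * (total - len(ct_text))
--     grid = [[[' ' for _ in range(d3)] for _ in range(d2)] for _ in range(d1)]
--     idx = 0
--     for i in range(d1):
--         for j in range(d2):
--             for k in range(d3):
--                 grid[i][j][k] = padded[idx]
--                 idx += 1
--
--     result = []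
--     for i in range(ct_len):
--         z = kv1[i % len(kv1)] % d1
--         y = kv2[i % len(kv2)] % d2
--         x = kv3[i % len(kv3)] % d3
--         result.append(grid[z][y][x])
--     return ''.join(result)
-- ===== SOURCE B (Python) =====
-- def collar_model(ct_text, d1, d2, d3, kv1, kv2, kv3, ct_len):
--     """Same selection, but no grid and no padded copy are ever built: each output
--     char is read straight from ct_text at the flat index z*d2*d3 + y*d3 + x,
--     falling back to the pad char 'X' past the end of the text."""
--     n = len(ct_text)
--     n1, n2, n3 = len(kv1), len(kv2), len(kv3)
--     out = []
--     for i in range(ct_len):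
--         idx = ((kv1[i % n1] % d1) * d2 * d3
--                + (kv2[i % n2] % d2) * d3
--                + kv3[i % n3] % d3)
--         out.append(ct_text[idx] if idx < n else 'X')
--     return ''.join(out)
-- ===== Notes on version B (the rewrite author's own statement) =====
-- stated objective: faster
-- what changed: B never materialises the d1*d2*d3 grid nor the padded copy of the text: each output character is read directly from ct_text at the flat index z*d2*d3 + y*d3 + x (or is the pad char 'X' past the end), so cost no longer depends on the grid volume.
import Mathlib
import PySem

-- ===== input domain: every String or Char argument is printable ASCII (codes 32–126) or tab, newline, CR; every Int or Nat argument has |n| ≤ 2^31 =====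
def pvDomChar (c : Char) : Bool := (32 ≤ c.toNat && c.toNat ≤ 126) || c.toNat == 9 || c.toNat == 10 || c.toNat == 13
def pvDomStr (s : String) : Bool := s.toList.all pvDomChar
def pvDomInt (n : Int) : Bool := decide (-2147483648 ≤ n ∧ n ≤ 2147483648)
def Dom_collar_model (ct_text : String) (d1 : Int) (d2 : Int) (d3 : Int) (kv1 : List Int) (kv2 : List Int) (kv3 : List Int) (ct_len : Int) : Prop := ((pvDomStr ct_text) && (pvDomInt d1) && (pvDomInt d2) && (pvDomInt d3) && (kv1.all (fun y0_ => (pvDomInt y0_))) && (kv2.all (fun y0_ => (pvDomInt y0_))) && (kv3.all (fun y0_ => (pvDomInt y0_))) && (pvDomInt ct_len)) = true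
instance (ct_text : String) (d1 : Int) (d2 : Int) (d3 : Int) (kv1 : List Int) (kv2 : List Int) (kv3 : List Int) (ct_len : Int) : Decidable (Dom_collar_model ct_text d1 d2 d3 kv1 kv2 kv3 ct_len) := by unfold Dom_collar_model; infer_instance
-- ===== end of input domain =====

-- B reads each output char straight off ct_text at the flat index z*d2*d3+y*d3+x (pad char 'X' past
-- the end), so it never builds the d1*d2*d3 grid nor the padded copy that A materialises.

-- ===== PORT A =====
-- Python list indexing lst[i] on an array-backed sequence (negative i counts from the end,
-- out of range would be an IndexError, excluded by Pre_): exact for every in-range index.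
def pvArrGetD {α : Type} (a : Array α) (i : Int) (d : α) : α :=
  let j := if i < 0 then i + (a.size : Int) else i
  if h : 0 ≤ j ∧ j < (a.size : Int) then a[j.toNat]'(by omega) else d

-- Literal transliteration of A; Python lists are dynamic arrays, so the grid, the padded text
-- and the result accumulator are Arrays; loop indices come from pyRange (always ≥ 0 here),
-- so .toNat is exact.
def collar_model (ct_text : String) (d1 : Int) (d2 : Int) (d3 : Int) (kv1 : List Int) (kv2 : List Int) (kv3 : List Int) (ct_len : Int) : String :=
  let total : Int := d1 * d2 * d3
  let padded : Array Char := (ct_text.toList ++ PySem.List.pyRepeat ['X'] (total - PySem.Str.len ct_text)).toArray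
  let grid0 : Array (Array (Array Char)) :=
    Array.replicate d1.toNat (Array.replicate d2.toNat (Array.replicate d3.toNat ' '))
  -- for i: for j: for k: grid[i][j][k] = padded[idx]; idx += 1   (idx stays ≥ 0, kept as Nat)
  let fill :=
    (PySem.List.pyRange 0 d1 1).foldl (fun (st : Array (Array (Array Char)) × Nat) i =>
      (PySem.List.pyRange 0 d2 1).foldl (fun st j =>
        (PySem.List.pyRange 0 d3 1).foldl (fun st k =>
          (st.1.modify i.toNat (fun pl => pl.modify j.toNat (fun row =>
             row.modify k.toNat (fun _ => padded.getD st.2 ' '))), st.2 + 1)) st) st) (grid0, 0)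
  let result : Array Char :=
    (PySem.List.pyRange 0 ct_len 1).foldl (fun (acc : Array Char) i =>
      let z := PySem.Int.mod (PySem.List.pyGetD kv1 (PySem.Int.mod i (kv1.length : Int)) 0) d1
      let y := PySem.Int.mod (PySem.List.pyGetD kv2 (PySem.Int.mod i (kv2.length : Int)) 0) d2
      let x := PySem.Int.mod (PySem.List.pyGetD kv3 (PySem.Int.mod i (kv3.length : Int)) 0) d3
      acc.push (pvArrGetD (pvArrGetD (pvArrGetD fill.1 z #[]) y #[]) x ' ')) #[]
  String.ofList result.toList

-- ===== PORT B =====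
def collar_model_alt (ct_text : String) (d1 : Int) (d2 : Int) (d3 : Int) (kv1 : List Int) (kv2 : List Int) (kv3 : List Int) (ct_len : Int) : String :=
  let n : Int := PySem.Str.len ct_text
  let n1 : Int := (kv1.length : Int)
  let n2 : Int := (kv2.length : Int)
  let n3 : Int := (kv3.length : Int)
  let out : Array Char :=
    (PySem.List.pyRange 0 ct_len 1).foldl (fun (acc : Array Char) i =>
      let idx := (PySem.Int.mod (PySem.List.pyGetD kv1 (PySem.Int.mod i n1) 0) d1) * d2 * d3
               + (PySem.Int.mod (PySem.List.pyGetD kv2 (PySem.Int.mod i n2) 0) d2) * d3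
               + PySem.Int.mod (PySem.List.pyGetD kv3 (PySem.Int.mod i n3) 0) d3
      acc.push (if idx < n then PySem.List.pyGetD ct_text.toList idx ' ' else 'X')) #[]
  String.ofList out.toList

-- ===== PRECONDITION & SPEC =====
-- Pre_ admits exactly the inputs on which the Python A returns: whenever ct_len > 0, all three
-- dimensions must be positive and all three keyword lists nonempty, otherwise A raises
-- (ZeroDivisionError on '% 0' or IndexError on the empty/short grid).
def Pre_collar_model (ct_text : String) (d1 : Int) (d2 : Int) (d3 : Int) (kv1 : List Int) (kv2 : List Int) (kv3 : List Int) (ct_len : Int) : Prop :=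
  ct_len ≤ 0 ∨ (0 < d1 ∧ 0 < d2 ∧ 0 < d3 ∧ kv1 ≠ [] ∧ kv2 ≠ [] ∧ kv3 ≠ [])
instance (ct_text : String) (d1 : Int) (d2 : Int) (d3 : Int) (kv1 : List Int) (kv2 : List Int) (kv3 : List Int) (ct_len : Int) : Decidable (Pre_collar_model ct_text d1 d2 d3 kv1 kv2 kv3 ct_len) := by unfold Pre_collar_model; infer_instance
def pvWitness_collar_model : String × Int × Int × Int × List Int × List Int × List Int × Int :=
  ("KRYPTOS", 2, 2, 2, [1], [0, 1], [1, 0], 5)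

def Spec_collar_model (ct_text : String) (d1 : Int) (d2 : Int) (d3 : Int) (kv1 : List Int) (kv2 : List Int) (kv3 : List Int) (ct_len : Int) (out : String) : Prop := out = collar_model_alt ct_text d1 d2 d3 kv1 kv2 kv3 ct_len
instance (ct_text : String) (d1 : Int) (d2 : Int) (d3 : Int) (kv1 : List Int) (kv2 : List Int) (kv3 : List Int) (ct_len : Int) (out : String) : Decidable (Spec_collar_model ct_text d1 d2 d3 kv1 kv2 kv3 ct_len out) := by unfold Spec_collar_model; infer_instance

-- ===== CLAIM (what is proved, stated in full; the proofs are below) =====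
def Claim_equal_collar_model : Prop := ∀ (ct_text : String) (d1 : Int) (d2 : Int) (d3 : Int) (kv1 : List Int) (kv2 : List Int) (kv3 : List Int) (ct_len : Int), Dom_collar_model ct_text d1 d2 d3 kv1 kv2 kv3 ct_len → Pre_collar_model ct_text d1 d2 d3 kv1 kv2 kv3 ct_len → Spec_collar_model ct_text d1 d2 d3 kv1 kv2 kv3 ct_len (collar_model ct_text d1 d2 d3 kv1 kv2 kv3 ct_len)

-- ===== LEMMAS AND PROOFS =====

theorem pv_modify_modify {β : Type} (l : List β) (a : Nat) (f g : β → β) :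
    (l.modify a g).modify a f = l.modify a (fun x => f (g x)) := by
  induction l generalizing a with
  | nil => simp
  | cons x t ih => cases a <;> simp [List.modify_cons, ih]

theorem pv_modify_id {β : Type} (l : List β) (a : Nat) :
    l.modify a (fun x => x) = l := by
  induction l generalizing a with
  | nil => simp
  | cons x t ih => cases a <;> simp [List.modify_cons, ih]

theorem pv_modify_append_left_length {β : Type} (l1 l2 : List β) (f : β → β) :
    (l1 ++ l2).modify l1.length f = l1 ++ l2.modify 0 f := by
  induction l1 with
  | nil => simp
  | cons x t ih => simp [List.modify_succ_cons, ih]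

/-- Factor a fixed-position `modify` out of a fold that threads a counter. -/
theorem pv_fold_modify_factor {ι β : Type} (c : Nat) (h : Nat → ι → β → β) (l : List ι) :
    ∀ (g : List β) (a idx0 : Nat),
    l.foldl (fun (st : List β × Nat) k => (st.1.modify a (h st.2 k), st.2 + c)) (g, idx0)
      = (g.modify a (fun p => (l.foldl (fun (st : β × Nat) k => (h st.2 k st.1, st.2 + c)) (p, idx0)).1),
         idx0 + c * l.length) := by
  induction l with
  | nil => intro g a idx0; simp [pv_modify_id]
  | cons k t ih =>
    intro g a idx0
    simp only [List.foldl_cons]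
    rw [ih, pv_modify_modify]
    refine Prod.ext rfl ?_
    simp [List.length_cons]; ring

/-- Filling the positions of a replicated list in order, with a payload depending on the counter. -/
theorem pv_modify_append_of_length {β : Type} (l1 l2 : List β) (f : β → β) (n : Nat)
    (h : l1.length = n) : (l1 ++ l2).modify n f = l1 ++ l2.modify 0 f := by
  subst h; exact pv_modify_append_left_length l1 l2 f

theorem pv_fold_fill_range {β : Type} (c : Nat) (payload : Nat → β → β) (x0 : β) :
    ∀ (n m idx0 : Nat),
    (List.range n).foldl (fun (st : List β × Nat) k => (st.1.modify k (payload st.2), st.2 + c))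
        (List.replicate (n + m) x0, idx0)
      = ((List.range n).map (fun k => payload (idx0 + c * k) x0) ++ List.replicate m x0,
         idx0 + c * n) := by
  intro n
  induction n with
  | zero => intro m idx0; simp
  | succ n ih =>
    intro m idx0
    have hrep : n + (m + 1) = n + 1 + m := by omega
    rw [List.range_succ, List.foldl_append, ← hrep, ih (m + 1) idx0]
    simp only [List.foldl_cons, List.foldl_nil, List.replicate_succ]
    rw [pv_modify_append_of_length _ _ _ n (by simp), List.modify_zero_cons]
    refine Prod.ext ?_ (by ring)
    simp

theorem pv_inner_fold_eq (pad : List Char) (c3 i j : Nat)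
    (g : List (List (List Char))) (idx : Nat) :
    (List.range c3).foldl (fun (st : List (List (List Char)) × Nat) k =>
        (st.1.modify i (fun pl => pl.modify j (fun row =>
           row.modify k (fun _ => pad.getD st.2 ' '))), st.2 + 1)) (g, idx)
      = (g.modify i (fun pl => pl.modify j (fun row =>
           ((List.range c3).foldl (fun (st : List Char × Nat) k =>
              (st.1.modify k (fun _ => pad.getD st.2 ' '), st.2 + 1)) (row, idx)).1)),
         idx + c3) := by
  rw [pv_fold_modify_factor 1
      (fun n k => fun (pl : List (List Char)) => pl.modify j (fun row => row.modify k (fun _ => pad.getD n ' '))) _ g i idx]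
  simp only [pv_fold_modify_factor 1 (fun n k => fun (row : List Char) => row.modify k (fun _ => pad.getD n ' '))]
  simp [List.length_range]

theorem pv_middle_fold_eq (pad : List Char) (c2 c3 i : Nat)
    (g : List (List (List Char))) (idx : Nat) :
    (List.range c2).foldl (fun (st : List (List (List Char)) × Nat) j =>
        (List.range c3).foldl (fun st k =>
          (st.1.modify i (fun pl => pl.modify j (fun row =>
             row.modify k (fun _ => pad.getD st.2 ' '))), st.2 + 1)) st) (g, idx)
      = (g.modify i (fun pl =>
           ((List.range c2).foldl (fun (st : List (List Char) × Nat) j =>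
              (st.1.modify j (fun row =>
                 ((List.range c3).foldl (fun (st2 : List Char × Nat) k =>
                    (st2.1.modify k (fun _ => pad.getD st2.2 ' '), st2.2 + 1)) (row, st.2)).1),
               st.2 + c3)) (pl, idx)).1),
         idx + c3 * c2) := by
  have hstep : (fun (st : List (List (List Char)) × Nat) (j : Nat) =>
      (List.range c3).foldl (fun st k =>
        (st.1.modify i (fun pl => pl.modify j (fun row =>
           row.modify k (fun _ => pad.getD st.2 ' '))), st.2 + 1)) st)
      = (fun (st : List (List (List Char)) × Nat) (j : Nat) =>
          (st.1.modify i ((fun n j => fun pl => pl.modify j (fun row =>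
             ((List.range c3).foldl (fun (st2 : List Char × Nat) k =>
                (st2.1.modify k (fun _ => pad.getD st2.2 ' '), st2.2 + 1)) (row, n)).1)) st.2 j),
           st.2 + c3)) := by
    funext st j
    exact pv_inner_fold_eq pad c3 i j st.1 st.2
  rw [hstep, pv_fold_modify_factor c3
      (fun n j => fun pl => pl.modify j (fun row =>
         ((List.range c3).foldl (fun (st2 : List Char × Nat) k =>
            (st2.1.modify k (fun _ => pad.getD st2.2 ' '), st2.2 + 1)) (row, n)).1)) _ g i idx]
  simp [List.length_range]

/-- Characterisation of A's grid-filling triple loop on the blank grid. -/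
theorem pv_fill_eq (pad : List Char) (c1 c2 c3 : Nat) :
    ((List.range c1).foldl (fun (st : List (List (List Char)) × Nat) i =>
        (List.range c2).foldl (fun st j =>
          (List.range c3).foldl (fun st k =>
            (st.1.modify i (fun pl => pl.modify j (fun row =>
               row.modify k (fun _ => pad.getD st.2 ' '))), st.2 + 1)) st) st)
       (List.replicate c1 (List.replicate c2 (List.replicate c3 ' ')), 0)).1
    = (List.range c1).map (fun i => (List.range c2).map (fun j =>
        (List.range c3).map (fun k => pad.getD (c3 * c2 * i + c3 * j + k) ' '))) := by
  have hstep : (fun (st : List (List (List Char)) × Nat) (i : Nat) =>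
      (List.range c2).foldl (fun st j =>
        (List.range c3).foldl (fun st k =>
          (st.1.modify i (fun pl => pl.modify j (fun row =>
             row.modify k (fun _ => pad.getD st.2 ' '))), st.2 + 1)) st) st)
      = (fun (st : List (List (List Char)) × Nat) (i : Nat) =>
          (st.1.modify i ((fun n => fun pl =>
             ((List.range c2).foldl (fun (st : List (List Char) × Nat) j =>
                (st.1.modify j (fun row =>
                   ((List.range c3).foldl (fun (st2 : List Char × Nat) k =>
                      (st2.1.modify k (fun _ => pad.getD st2.2 ' '), st2.2 + 1)) (row, st.2)).1),
                 st.2 + c3)) (pl, n)).1) st.2),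
           st.2 + c3 * c2)) := by
    funext st i
    exact pv_middle_fold_eq pad c2 c3 i st.1 st.2
  rw [hstep]
  have h1 := pv_fold_fill_range (c3 * c2)
      (fun n => fun pl =>
        ((List.range c2).foldl (fun (st : List (List Char) × Nat) j =>
           (st.1.modify j (fun row =>
              ((List.range c3).foldl (fun (st2 : List Char × Nat) k =>
                 (st2.1.modify k (fun _ => pad.getD st2.2 ' '), st2.2 + 1)) (row, st.2)).1),
            st.2 + c3)) (pl, n)).1)
      (List.replicate c2 (List.replicate c3 ' ')) c1 0 0
  rw [Nat.add_zero] at h1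
  rw [h1]
  simp only [List.replicate_zero, List.append_nil]
  refine List.map_congr_left (fun i _ => ?_)
  have h2 := pv_fold_fill_range c3
      (fun n => fun row =>
        ((List.range c3).foldl (fun (st2 : List Char × Nat) k =>
           (st2.1.modify k (fun _ => pad.getD st2.2 ' '), st2.2 + 1)) (row, n)).1)
      (List.replicate c3 ' ') c2 0 (0 + c3 * c2 * i)
  rw [Nat.add_zero] at h2
  rw [h2]
  simp only [List.replicate_zero, List.append_nil]
  refine List.map_congr_left (fun j _ => ?_)
  have h3 := pv_fold_fill_range 1 (fun n => fun _ => pad.getD n ' ') ' ' c3 0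
      (0 + c3 * c2 * i + c3 * j)
  rw [Nat.add_zero] at h3
  rw [h3]
  simp only [List.replicate_zero, List.append_nil]
  refine List.map_congr_left (fun k _ => ?_)
  congr 1
  ring

/-- The port's pyRange-indexed fill loop, rewritten to the Nat-indexed form. -/
theorem pv_fill_port_eq (pad : List Char) (d1 d2 d3 : Int) :
    ((PySem.List.pyRange 0 d1 1).foldl (fun (st : List (List (List Char)) × Nat) i =>
      (PySem.List.pyRange 0 d2 1).foldl (fun st j =>
        (PySem.List.pyRange 0 d3 1).foldl (fun st k =>
          (st.1.modify i.toNat (fun pl => pl.modify j.toNat (fun row =>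
             row.modify k.toNat (fun _ => pad.getD st.2 ' '))), st.2 + 1)) st) st)
      (List.replicate d1.toNat (List.replicate d2.toNat (List.replicate d3.toNat ' ')), 0)).1
    = (List.range d1.toNat).map (fun i => (List.range d2.toNat).map (fun j =>
        (List.range d3.toNat).map (fun k =>
          pad.getD (d3.toNat * d2.toNat * i + d3.toNat * j + k) ' '))) := by
  simp only [PySem.List.pyRange_one, List.foldl_map, zero_add, Int.sub_zero, Int.toNat_natCast]
  exact pv_fill_eq pad d1.toNat d2.toNat d3.toNat

theorem pv_getD_toArray {α : Type} (l : List α) (n : Nat) (d : α) :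
    l.toArray.getD n d = l.getD n d := by
  by_cases h : n < l.length
  · simp [Array.getD, h, List.getD_eq_getElem l d h]
  · rw [List.getD_eq_default _ _ (Nat.le_of_not_lt h)]
    simp [Array.getD, h]

theorem pvArrGetD_eq {α : Type} (a : Array α) (i : Int) (d : α)
    (h0 : 0 ≤ i) (h1 : i < (a.size : Int)) :
    pvArrGetD a i d = a[i.toNat]'(by omega) := by
  have hneg : ¬ i < 0 := by omega
  simp [pvArrGetD, hneg, h0, h1]

theorem pv_map_modify {α β : Type} (g : α → β) (f : α → α) (f' : β → β)
    (hfg : ∀ x, g (f x) = f' (g x)) :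
    ∀ (l : List α) (i : Nat), (l.modify i f).map g = (l.map g).modify i f' := by
  intro l
  induction l with
  | nil => intro i; simp
  | cons a t ih =>
    intro i
    cases i with
    | zero => simp [List.modify_zero_cons, hfg]
    | succ i => simp [List.modify_succ_cons, ih]

theorem pv_foldl_proj {σ τ ι : Type} (p : σ → τ) (fA : σ → ι → σ) (fL : τ → ι → τ)
    (h : ∀ s i, p (fA s i) = fL (p s) i) :
    ∀ (l : List ι) (s : σ), p (l.foldl fA s) = l.foldl fL (p s) := by
  intro l
  induction l with
  | nil => intro s; rfl
  | cons a t ih => intro s; simp only [List.foldl_cons, ih, h]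

theorem pv_foldl_push_toList {ι : Type} (f : ι → Char) (l : List ι) (a : Array Char) :
    (l.foldl (fun acc i => acc.push (f i)) a).toList = a.toList ++ l.map f := by
  induction l generalizing a with
  | nil => simp
  | cons x t ih => simp [ih, Array.toList_push]

def pvProj (st : Array (Array (Array Char)) × Nat) : List (List (List Char)) × Nat :=
  (st.1.toList.map (fun pl => pl.toList.map Array.toList), st.2)

theorem pv_step_proj (pad : List Char) (i j k : Int) (s2 : Array (Array (Array Char)) × Nat) :
    pvProj (s2.1.modify i.toNat (fun pl => pl.modify j.toNat (fun row =>
        row.modify k.toNat (fun _ => pad.toArray.getD s2.2 ' '))), s2.2 + 1)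
    = ((pvProj s2).1.modify i.toNat (fun pl => pl.modify j.toNat (fun row =>
        row.modify k.toNat (fun _ => pad.getD s2.2 ' '))), (pvProj s2).2 + 1) := by
  refine Prod.ext ?_ rfl
  show (s2.1.modify _ _).toList.map _ = (s2.1.toList.map _).modify _ _
  rw [Array.toList_modify]
  refine pv_map_modify _ _ _ (fun pl => ?_) _ _
  rw [Array.toList_modify]
  refine pv_map_modify _ _ _ (fun row => ?_) _ _
  rw [Array.toList_modify, pv_getD_toArray]

/-- The Array-backed fill loop of port A projects (via toList) onto the Nat-indexed grid. -/
theorem pv_afill_proj (pad : List Char) (d1 d2 d3 : Int) :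
    ((PySem.List.pyRange 0 d1 1).foldl (fun (st : Array (Array (Array Char)) × Nat) i =>
      (PySem.List.pyRange 0 d2 1).foldl (fun st j =>
        (PySem.List.pyRange 0 d3 1).foldl (fun st k =>
          (st.1.modify i.toNat (fun pl => pl.modify j.toNat (fun row =>
             row.modify k.toNat (fun _ => pad.toArray.getD st.2 ' '))), st.2 + 1)) st) st)
      (Array.replicate d1.toNat (Array.replicate d2.toNat (Array.replicate d3.toNat ' ')), 0)).1.toList.map
        (fun pl => pl.toList.map Array.toList)
    = (List.range d1.toNat).map (fun i => (List.range d2.toNat).map (fun j =>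
        (List.range d3.toNat).map (fun k =>
          pad.getD (d3.toNat * d2.toNat * i + d3.toNat * j + k) ' '))) := by
  rw [← pv_fill_port_eq pad d1 d2 d3]
  have h := pv_foldl_proj pvProj
    (fun (st : Array (Array (Array Char)) × Nat) (i : Int) =>
      (PySem.List.pyRange 0 d2 1).foldl (fun st j =>
        (PySem.List.pyRange 0 d3 1).foldl (fun st k =>
          (st.1.modify i.toNat (fun pl => pl.modify j.toNat (fun row =>
             row.modify k.toNat (fun _ => pad.toArray.getD st.2 ' '))), st.2 + 1)) st) st)
    (fun (st : List (List (List Char)) × Nat) (i : Int) =>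
      (PySem.List.pyRange 0 d2 1).foldl (fun st j =>
        (PySem.List.pyRange 0 d3 1).foldl (fun st k =>
          (st.1.modify i.toNat (fun pl => pl.modify j.toNat (fun row =>
             row.modify k.toNat (fun _ => pad.getD st.2 ' '))), st.2 + 1)) st) st)
    (fun st i => pv_foldl_proj pvProj _ _
      (fun s j => pv_foldl_proj pvProj _ _
        (fun s2 k => pv_step_proj pad i j k s2) _ s) _ st)
    (PySem.List.pyRange 0 d1 1)
    (Array.replicate d1.toNat (Array.replicate d2.toNat (Array.replicate d3.toNat ' ')), 0)
  have hinit : pvProj (Array.replicate d1.toNat (Array.replicate d2.toNat (Array.replicate d3.toNat ' ')), 0)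
      = ((List.replicate d1.toNat (List.replicate d2.toNat (List.replicate d3.toNat ' ')), 0) : List (List (List Char)) × Nat) := by
    simp [pvProj, Array.toList_replicate, List.map_replicate]
  rw [hinit] at h
  exact congrArg Prod.fst h

/-- Triple indexing into the filled Array grid reads the flat padded index. -/
theorem pv_arr_lookup (G : Array (Array (Array Char))) (pad : List Char) (c1 c2 c3 : Nat)
    (hproj : G.toList.map (fun pl => pl.toList.map Array.toList)
      = (List.range c1).map (fun i => (List.range c2).map (fun j =>
          (List.range c3).map (fun k => pad.getD (c3 * c2 * i + c3 * j + k) ' '))))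
    (z y x : Int) (hz0 : 0 ≤ z) (hz1 : z < (c1 : Int)) (hy0 : 0 ≤ y) (hy1 : y < (c2 : Int))
    (hx0 : 0 ≤ x) (hx1 : x < (c3 : Int)) :
    pvArrGetD (pvArrGetD (pvArrGetD G z #[]) y #[]) x ' '
      = pad.getD (c3 * c2 * z.toNat + c3 * y.toNat + x.toNat) ' ' := by
  have hG : G.size = c1 := by
    have := congrArg List.length hproj; simpa using this
  have hget : ∀ (i : Nat) (hi : i < c1),
      (G[i]'(by omega)).toList.map Array.toList
        = (List.range c2).map (fun j => (List.range c3).map (fun k =>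
            pad.getD (c3 * c2 * i + c3 * j + k) ' ')) := by
    intro i hi
    have h2 : (G.toList.map (fun pl => pl.toList.map Array.toList))[i]'(by simpa [hG]) =
        ((List.range c1).map (fun i => (List.range c2).map (fun j =>
          (List.range c3).map (fun k => pad.getD (c3 * c2 * i + c3 * j + k) ' '))))[i]'(by simpa) := by
      simp_rw [hproj]
    simpa [Array.getElem_toList] using h2
  have hz1' : z.toNat < c1 := by omega
  rw [pvArrGetD_eq G z #[] hz0 (by omega)]
  have hPl := hget z.toNat hz1'
  set Pl := G[z.toNat]'(by omega) with hPldef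
  have hPlsize : Pl.size = c2 := by
    have := congrArg List.length hPl; simpa using this
  have hy1' : y.toNat < c2 := by omega
  rw [pvArrGetD_eq Pl y #[] hy0 (by omega)]
  have hRow : (Pl[y.toNat]'(by omega)).toList = (List.range c3).map (fun k =>
      pad.getD (c3 * c2 * z.toNat + c3 * y.toNat + k) ' ') := by
    have h2 : (Pl.toList.map Array.toList)[y.toNat]'(by simpa [hPlsize]) =
        ((List.range c2).map (fun j => (List.range c3).map (fun k =>
          pad.getD (c3 * c2 * z.toNat + c3 * j + k) ' ')))[y.toNat]'(by simpa [hy1']) := by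
      simp_rw [hPl]
    simpa [Array.getElem_toList] using h2
  set Row := Pl[y.toNat]'(by omega) with hRowdef
  have hRowsize : Row.size = c3 := by
    have := congrArg List.length hRow; simpa using this
  have hx1' : x.toNat < c3 := by omega
  rw [pvArrGetD_eq Row x ' ' hx0 (by omega)]
  have h3 : Row.toList[x.toNat]'(by simpa [hRowsize]) =
      ((List.range c3).map (fun k => pad.getD (c3 * c2 * z.toNat + c3 * y.toNat + k) ' '))[x.toNat]'(by simpa [hx1']) := by
    simp_rw [hRow]
  simpa [Array.getElem_toList] using h3

/-- The flat padded read equals B's direct read off the text (pad char past the end). -/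
theorem pv_flat_eq (ct : List Char) (d1 d2 d3 z y x : Int)
    (hd1 : 0 < d1) (hd2 : 0 < d2) (hd3 : 0 < d3)
    (hz0 : 0 ≤ z) (hz1 : z < d1) (hy0 : 0 ≤ y) (hy1 : y < d2) (hx0 : 0 ≤ x) (hx1 : x < d3) :
    (ct ++ List.replicate (d1 * d2 * d3 - (ct.length : Int)).toNat 'X').getD
        (d3.toNat * d2.toNat * z.toNat + d3.toNat * y.toNat + x.toNat) ' '
      = (if z * d2 * d3 + y * d3 + x < (ct.length : Int)
         then PySem.List.pyGetD ct (z * d2 * d3 + y * d3 + x) ' ' else 'X') := by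
  have e1 : ((d1.toNat : Int)) = d1 := Int.toNat_of_nonneg hd1.le
  have e2 : ((d2.toNat : Int)) = d2 := Int.toNat_of_nonneg hd2.le
  have e3 : ((d3.toNat : Int)) = d3 := Int.toNat_of_nonneg hd3.le
  have hN : ((d3.toNat * d2.toNat * z.toNat + d3.toNat * y.toNat + x.toNat : Nat) : Int)
      = z * d2 * d3 + y * d3 + x := by
    push_cast
    rw [e2, e3, Int.toNat_of_nonneg hz0, Int.toNat_of_nonneg hy0, Int.toNat_of_nonneg hx0]
    ring
  have hrow : d3.toNat * y.toNat + x.toNat < d3.toNat * d2.toNat := by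
    have hy' : y.toNat + 1 ≤ d2.toNat := by omega
    calc d3.toNat * y.toNat + x.toNat < d3.toNat * y.toNat + d3.toNat := by omega
      _ = d3.toNat * (y.toNat + 1) := by ring
      _ ≤ d3.toNat * d2.toNat := Nat.mul_le_mul_left _ hy'
  have hNlt : d3.toNat * d2.toNat * z.toNat + d3.toNat * y.toNat + x.toNat
      < d1.toNat * d2.toNat * d3.toNat := by
    have hz' : z.toNat + 1 ≤ d1.toNat := by omega
    calc d3.toNat * d2.toNat * z.toNat + d3.toNat * y.toNat + x.toNat
        < d3.toNat * d2.toNat * z.toNat + d3.toNat * d2.toNat := by omega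
      _ = d3.toNat * d2.toNat * (z.toNat + 1) := by ring
      _ ≤ d3.toNat * d2.toNat * d1.toNat := Nat.mul_le_mul_left _ hz'
      _ = d1.toNat * d2.toNat * d3.toNat := by ring
  have hTot : ((d1.toNat * d2.toNat * d3.toNat : Nat) : Int) = d1 * d2 * d3 := by
    push_cast; rw [e1, e2, e3]
  set N : Nat := d3.toNat * d2.toNat * z.toNat + d3.toNat * y.toNat + x.toNat with hNdef
  have hpadlen : N < (ct ++ List.replicate (d1 * d2 * d3 - (ct.length : Int)).toNat 'X').length := by
    simp only [List.length_append, List.length_replicate]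
    omega
  by_cases hlt : z * d2 * d3 + y * d3 + x < (ct.length : Int)
  · have hNL : N < ct.length := by omega
    rw [if_pos hlt, List.getD_eq_getElem _ _ hpadlen, List.getElem_append_left hNL,
        PySem.List.pyGetD_eq_getElem _ _ (by omega) (by omega)]
    congr 1
    omega
  · have hNL : ct.length ≤ N := by omega
    rw [if_neg hlt, List.getD_eq_getElem _ _ hpadlen, List.getElem_append_right hNL]
    simp

-- ===== VERDICT (by name: the statement is the Claim_ definition above) =====
theorem collar_model_spec : Claim_equal_collar_model := by
  intro ct_text d1 d2 d3 kv1 kv2 kv3 ct_len _ hpre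
  unfold Spec_collar_model collar_model collar_model_alt
  rcases hpre with hc | ⟨hd1, hd2, hd3, -, -, -⟩
  · simp [PySem.List.pyRange_one_eq_nil hc]
  · simp only [PySem.List.pyRepeat_singleton, PySem.Str.len_eq, pv_foldl_push_toList,
      Array.toList_empty, List.nil_append]
    refine congrArg String.ofList (List.map_congr_left fun i _ => ?_)
    have hz0 := PySem.Int.mod_nonneg (PySem.List.pyGetD kv1 (PySem.Int.mod i (kv1.length : Int)) 0) hd1
    have hz1 := PySem.Int.mod_lt (PySem.List.pyGetD kv1 (PySem.Int.mod i (kv1.length : Int)) 0) hd1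
    have hy0 := PySem.Int.mod_nonneg (PySem.List.pyGetD kv2 (PySem.Int.mod i (kv2.length : Int)) 0) hd2
    have hy1 := PySem.Int.mod_lt (PySem.List.pyGetD kv2 (PySem.Int.mod i (kv2.length : Int)) 0) hd2
    have hx0 := PySem.Int.mod_nonneg (PySem.List.pyGetD kv3 (PySem.Int.mod i (kv3.length : Int)) 0) hd3
    have hx1 := PySem.Int.mod_lt (PySem.List.pyGetD kv3 (PySem.Int.mod i (kv3.length : Int)) 0) hd3
    rw [pv_arr_lookup _ _ d1.toNat d2.toNat d3.toNat
        (pv_afill_proj (ct_text.toList ++ List.replicate (d1 * d2 * d3 - (ct_text.toList.length : Int)).toNat 'X') d1 d2 d3)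
        _ _ _ hz0 (by omega) hy0 (by omega) hx0 (by omega),
      pv_flat_eq ct_text.toList d1 d2 d3 _ _ _ hd1 hd2 hd3 hz0 hz1 hy0 hy1 hx0 hx1]
    rfl
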